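-- pv_equiv track=rewrite | github.com/PragunBajracharya/advent-of-code | 2024/2/second.py | safeChecker
-- ===== SOURCE A (Python) =====
-- def safeChecker(arr):
--     if len(arr) != len(set(arr)):
--         return False
--     if arr != sorted(arr) and arr != sorted(arr, reverse=True):
--         return False
--     for y in range(1, len(arr)):
--         diff = abs(arr[y] - arr[y - 1])
--         if diff > 3:
--             return False
--     return True
-- ===== SOURCE B (Python) =====
-- def safeChecker(arr):
--     # single linear pass over adjacent pairs: safe iff every step is +1..+3 or every step is -1..-3
--     return (all(1 <= b - a <= 3 for a, b in zip(arr, arr[1:]))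
--             or all(-3 <= b - a <= -1 for a, b in zip(arr, arr[1:])))
-- ===== Notes on version B (the rewrite author's own statement) =====
-- stated objective: faster
-- what changed: replaced the distinctness-via-set, two full sorts and an index loop by a single linear scan over adjacent pairs checking that every step is in +1..+3 or every step is in -1..-3
import Mathlib
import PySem

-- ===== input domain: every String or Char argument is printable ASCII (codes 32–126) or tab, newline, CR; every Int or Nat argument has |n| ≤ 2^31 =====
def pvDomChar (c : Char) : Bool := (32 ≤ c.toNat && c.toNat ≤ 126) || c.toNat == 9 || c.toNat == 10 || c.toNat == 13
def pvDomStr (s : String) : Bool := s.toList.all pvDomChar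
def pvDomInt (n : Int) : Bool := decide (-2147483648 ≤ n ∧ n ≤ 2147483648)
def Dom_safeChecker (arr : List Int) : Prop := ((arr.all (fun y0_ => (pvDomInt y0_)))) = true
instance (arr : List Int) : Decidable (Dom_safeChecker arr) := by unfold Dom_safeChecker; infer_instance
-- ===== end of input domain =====

-- B replaces A's set-based distinctness test plus two sorts plus an index loop by one
-- linear pass over adjacent pairs (objective: faster, O(n) instead of O(n log n)).

-- ===== PORT A =====
-- for y in range(1, len(arr)): diff = abs(arr[y]-arr[y-1]); if diff > 3: return False
def safeCheckerLoop (arr : List Int) : List Int → Bool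
  | [] => true
  | y :: rest =>
      let diff := (PySem.List.pyGetD arr y 0 - PySem.List.pyGetD arr (y - 1) 0).natAbs
      if 3 < diff then false else safeCheckerLoop arr rest

def safeChecker (arr : List Int) : Bool :=
  if arr.length ≠ (PySem.Set.ofList arr).length then false
  else if arr ≠ PySem.List.sorted arr (fun x => x) ∧ arr ≠ PySem.List.sorted arr (fun x => x) true
    then false
  else safeCheckerLoop arr (PySem.List.pyRange 1 arr.length 1)

-- ===== PORT B =====
def safeChecker_alt (arr : List Int) : Bool :=
  (arr.zip (arr.drop 1)).all (fun p => decide (1 ≤ p.2 - p.1) && decide (p.2 - p.1 ≤ 3)) ||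
  (arr.zip (arr.drop 1)).all (fun p => decide (-3 ≤ p.2 - p.1) && decide (p.2 - p.1 ≤ -1))

-- ===== PRECONDITION & SPEC =====
def Spec_safeChecker (arr : List Int) (out : Bool) : Prop := out = safeChecker_alt arr
instance (arr : List Int) (out : Bool) : Decidable (Spec_safeChecker arr out) := by unfold Spec_safeChecker; infer_instance

-- ===== CLAIM (what is proved, stated in full; the proofs are below) =====
def Claim_equal_safeChecker : Prop := ∀ (arr : List Int), Dom_safeChecker arr → Spec_safeChecker arr (safeChecker arr)

-- ===== LEMMAS AND PROOFS =====

theorem pvOfList_sublist {α : Type} [BEq α] [LawfulBEq α] (xs : List α) :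
    (PySem.Set.ofList xs : List α).Sublist xs := by
  induction xs with
  | nil => simp [PySem.Set.ofList, PySem.Set.empty]
  | cons x xs ih =>
      rw [PySem.Set.ofList_cons]
      exact List.Sublist.cons₂ x (List.Sublist.trans (List.filter_sublist) ih)

theorem pvLen_eq_iff_nodup (xs : List Int) :
    (xs.length = (PySem.Set.ofList xs : List Int).length) ↔ xs.Nodup := by
  constructor
  · intro h
    have := List.Sublist.eq_of_length (pvOfList_sublist xs) h.symm
    rw [← this]
    exact PySem.Set.nodup_ofList xs
  · intro h; rw [PySem.Set.ofList_eq_self_of_nodup _ h]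

theorem pvEq_sorted_iff (arr : List Int) :
    arr = PySem.List.sorted arr (fun x => x) ↔ arr.Pairwise (· ≤ ·) := by
  constructor
  · intro h
    have := PySem.List.sorted_pairwise arr (fun x => x)
    rw [← h] at this; exact this
  · intro h; exact (PySem.List.sorted_eq_self_of_pairwise arr (fun x => x) h).symm

theorem pvEq_sorted_rev_iff (arr : List Int) :
    arr = PySem.List.sorted arr (fun x => x) true ↔ arr.Pairwise (fun a b => b ≤ a) := by
  constructor
  · intro h
    have := PySem.List.sorted_pairwise_rev arr (fun x => x)
    rw [← h] at this; exact this
  · intro h; exact (PySem.List.sorted_rev_eq_self_of_pairwise arr (fun x => x) h).symm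

theorem pvLoop_eq_all (arr : List Int) (ys : List Int) :
    safeCheckerLoop arr ys =
      ys.all (fun y => decide ((PySem.List.pyGetD arr y 0 - PySem.List.pyGetD arr (y - 1) 0).natAbs ≤ 3)) := by
  induction ys with
  | nil => rfl
  | cons y ys ih =>
      simp only [safeCheckerLoop, List.all_cons, ih]
      by_cases h : 3 < (PySem.List.pyGetD arr y 0 - PySem.List.pyGetD arr (y - 1) 0).natAbs
      · have h' : ¬ (PySem.List.pyGetD arr y 0 - PySem.List.pyGetD arr (y - 1) 0).natAbs ≤ 3 := by omega
        simp [h, h']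
      · have h' : (PySem.List.pyGetD arr y 0 - PySem.List.pyGetD arr (y - 1) 0).natAbs ≤ 3 := by omega
        simp [h, h']

-- the A-side loop condition in getElem form
theorem pvLoop_iff (arr : List Int) :
    (safeCheckerLoop arr (PySem.List.pyRange 1 arr.length 1) = true) ↔
      ∀ i : Nat, (h : i + 1 < arr.length) → (arr[i + 1] - arr[i]).natAbs ≤ 3 := by
  rw [pvLoop_eq_all, List.all_eq_true]
  constructor
  · intro h i hi
    have hy := h ((i : Int) + 1) (by
      rw [PySem.List.mem_pyRange_one]
      constructor <;> [omega; exact_mod_cast hi])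
    rw [PySem.List.pyGetD_eq_getElem _ _ (by omega) (by exact_mod_cast hi),
        PySem.List.pyGetD_eq_getElem _ _ (by omega) (by push_cast; omega)] at hy
    simp only [decide_eq_true_eq] at hy
    have h1 : ((i : Int) + 1).toNat = i + 1 := by omega
    have h2 : ((i : Int) + 1 - 1).toNat = i := by omega
    simpa [h1, h2] using hy
  · intro h y hy
    rw [PySem.List.mem_pyRange_one] at hy
    obtain ⟨h1, h2⟩ := hy
    rw [PySem.List.pyGetD_eq_getElem _ _ (by omega) (by push_cast; omega),
        PySem.List.pyGetD_eq_getElem _ _ (by omega) (by push_cast; omega)]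
    simp only [decide_eq_true_eq]
    have h4 : (y - 1).toNat + 1 < arr.length := by omega
    have h5 := h (y - 1).toNat h4
    convert h5 using 4 <;> omega

-- a B-side all over adjacent pairs in getElem form
theorem pvPairs_iff (arr : List Int) (f : Int × Int → Bool) :
    ((arr.zip (arr.drop 1)).all f = true) ↔
      ∀ i : Nat, (h : i + 1 < arr.length) → f (arr[i], arr[i + 1]) := by
  rw [List.all_eq_true]
  have hlen : (arr.zip (arr.drop 1)).length = arr.length - 1 := by
    rw [List.length_zip, List.length_drop]; omega
  constructor
  · intro h i hi
    have hiz : i < (arr.zip (arr.drop 1)).length := by omega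
    have hmem : (arr.zip (arr.drop 1))[i] ∈ arr.zip (arr.drop 1) := List.getElem_mem hiz
    have := h _ hmem
    rw [List.getElem_zip, List.getElem_drop] at this
    simpa [Nat.add_comm] using this
  · intro h p hp
    rw [List.mem_iff_getElem] at hp
    obtain ⟨i, hi, rfl⟩ := hp
    rw [List.getElem_zip, List.getElem_drop]
    have := h i (by omega)
    simpa [Nat.add_comm] using this

theorem safeChecker_eq (arr : List Int) : safeChecker arr = safeChecker_alt arr := by
  -- index-form characterisations of both sides
  have hA := pvLoop_iff arr
  have hB1 := pvPairs_iff arr (fun p => decide (1 ≤ p.2 - p.1) && decide (p.2 - p.1 ≤ 3))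
  have hB2 := pvPairs_iff arr (fun p => decide (-3 ≤ p.2 - p.1) && decide (p.2 - p.1 ≤ -1))
  simp only [decide_eq_true_eq, Bool.and_eq_true] at hB1 hB2
  unfold safeChecker safeChecker_alt
  by_cases hP : (arr.zip (arr.drop 1)).all (fun p => decide (1 ≤ p.2 - p.1) && decide (p.2 - p.1 ≤ 3)) = true
  · -- strictly increasing with small steps: A also returns true
    have hP' := hB1.mp hP
    have hchain : List.IsChain (· < ·) arr := by
      rw [List.isChain_iff_getElem]; intro i hi; have := hP' i hi; omega
    have hpw : arr.Pairwise (· < ·) := hchain.pairwise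
    have hnodup : arr.Nodup := hpw.imp (fun h => ne_of_lt h)
    have hsorted : arr = PySem.List.sorted arr (fun x => x) :=
      (pvEq_sorted_iff arr).mpr (hpw.imp le_of_lt)
    rw [if_neg (by simpa using (pvLen_eq_iff_nodup arr).mpr hnodup),
        if_neg (fun h => h.1 hsorted)]
    have hloop : safeCheckerLoop arr (PySem.List.pyRange 1 arr.length 1) = true := by
      rw [hA]; intro i hi; have := hP' i hi; omega
    rw [hloop, hP, Bool.true_or]
  · by_cases hQ : (arr.zip (arr.drop 1)).all (fun p => decide (-3 ≤ p.2 - p.1) && decide (p.2 - p.1 ≤ -1)) = true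
    · -- strictly decreasing with small steps
      have hQ' := hB2.mp hQ
      have hchain : List.IsChain (fun a b : Int => b < a) arr := by
        rw [List.isChain_iff_getElem]; intro i hi; have := hQ' i hi; omega
      have hpw : arr.Pairwise (fun a b : Int => b < a) := hchain.pairwise
      have hnodup : arr.Nodup := hpw.imp (fun h => (ne_of_lt h).symm)
      have hsorted : arr = PySem.List.sorted arr (fun x => x) true :=
        (pvEq_sorted_rev_iff arr).mpr (hpw.imp le_of_lt)
      rw [if_neg (by simpa using (pvLen_eq_iff_nodup arr).mpr hnodup),
          if_neg (fun h => h.2 hsorted)]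
      have hloop : safeCheckerLoop arr (PySem.List.pyRange 1 arr.length 1) = true := by
        rw [hA]; intro i hi; have := hQ' i hi; omega
      rw [hloop, hQ, Bool.or_true]
    · -- B returns false; show A returns false too
      rw [Bool.not_eq_true] at hP hQ
      rw [hP, hQ, Bool.or_false]
      by_cases hN : arr.length ≠ (PySem.Set.ofList arr : List Int).length
      · rw [if_pos hN]
      · rw [if_neg hN]
        push_neg at hN
        have hnodup : arr.Nodup := (pvLen_eq_iff_nodup arr).mp hN
        by_cases hS : arr ≠ PySem.List.sorted arr (fun x => x) ∧ arr ≠ PySem.List.sorted arr (fun x => x) true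
        · rw [if_pos hS]
        · rw [if_neg hS]
          push_neg at hS
          rw [← Bool.not_eq_true]
          intro hall
          have hloop := hA.mp hall
          have hne : ∀ i : Nat, (h : i + 1 < arr.length) → arr[i + 1] ≠ arr[i] := by
            intro i hi
            have := List.pairwise_iff_getElem.mp hnodup i (i+1) (by omega) hi (by omega)
            exact fun he => this he.symm
          by_cases hasc : arr = PySem.List.sorted arr (fun x => x)
          · have hpw := (pvEq_sorted_iff arr).mp hasc
            have : (arr.zip (arr.drop 1)).all
                (fun p => decide (1 ≤ p.2 - p.1) && decide (p.2 - p.1 ≤ 3)) = true := by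
              rw [hB1]
              intro i hi
              have hle := List.pairwise_iff_getElem.mp hpw i (i+1) (by omega) hi (by omega)
              have h3 := hloop i hi
              have h4 := hne i hi
              constructor <;> omega
            rw [hP] at this; exact Bool.false_ne_true this
          · have hdesc := hS hasc
            have hpw := (pvEq_sorted_rev_iff arr).mp hdesc
            have : (arr.zip (arr.drop 1)).all
                (fun p => decide (-3 ≤ p.2 - p.1) && decide (p.2 - p.1 ≤ -1)) = true := by
              rw [hB2]
              intro i hi
              have hle := List.pairwise_iff_getElem.mp hpw i (i+1) (by omega) hi (by omega)
              have h3 := hloop i hi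
              have h4 := hne i hi
              constructor <;> omega
            rw [hQ] at this; exact Bool.false_ne_true this

-- ===== VERDICT (by name: the statement is the Claim_ definition above) =====
theorem safeChecker_spec : Claim_equal_safeChecker := by
  intro arr _; exact safeChecker_eq arr
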